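-- pv_equiv track=rewrite | github.com/Khalil-Assaf/bayesian-optimization-stiffness-2d-materials | paper-scripts/utils.py | _is_bare_mxene
-- ===== SOURCE A (Python) =====
-- _EARLY_TM = {"Sc", "Y", "Ti", "Zr", "Hf", "V", "Nb", "Ta", "Cr", "Mo", "W"}
--
-- def _is_bare_mxene(comps: dict) -> bool:
--     if not comps:
--         return False
--     allowed = set(_EARLY_TM) | {"C", "N"}
--     if any(el not in allowed for el in comps.keys()):
--         return False
--     has_tm = any(el in _EARLY_TM for el in comps.keys())
--     has_cn = any(el in {"C", "N"} for el in comps.keys())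
--     return has_tm and has_cn
-- ===== SOURCE B (Python) =====
-- _EARLY_TM = {"Sc", "Y", "Ti", "Zr", "Hf", "V", "Nb", "Ta", "Cr", "Mo", "W"}
--
-- def _is_bare_mxene(comps: dict) -> bool:
--     has_tm = False
--     has_cn = False
--     for el in comps.keys():
--         if el in _EARLY_TM:
--             has_tm = True
--         elif el in ("C", "N"):
--             has_cn = True
--         else:
--             return False
--     return has_tm and has_cn
-- ===== Notes on version B (the rewrite author's own statement) =====
-- stated objective: simpler
-- what changed: Replaced the empty-check plus three separate any()/membership scans over the keys with one single pass that classifies each key (early TM / C-N / forbidden, returning False immediately on a forbidden key) while maintaining two flags, returning has_tm and has_cn at the end; the empty dict falls out of the flags.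
import Mathlib
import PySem

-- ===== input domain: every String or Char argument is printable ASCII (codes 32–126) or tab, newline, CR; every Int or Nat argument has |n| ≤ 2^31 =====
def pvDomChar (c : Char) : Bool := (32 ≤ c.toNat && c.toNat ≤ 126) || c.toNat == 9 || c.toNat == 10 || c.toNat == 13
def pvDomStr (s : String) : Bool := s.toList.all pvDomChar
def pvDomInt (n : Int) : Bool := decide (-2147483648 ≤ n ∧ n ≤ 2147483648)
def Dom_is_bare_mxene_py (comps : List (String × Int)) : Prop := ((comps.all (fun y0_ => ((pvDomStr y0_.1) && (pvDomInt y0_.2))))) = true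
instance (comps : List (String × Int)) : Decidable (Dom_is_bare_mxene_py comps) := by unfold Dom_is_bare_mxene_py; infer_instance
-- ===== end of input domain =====

-- B replaces A's empty-check and three separate any() scans over the keys with one
-- single-pass loop maintaining two flags and an early False on a forbidden key (objective: simpler).

-- ===== PORT A =====
def pvEarlyTM : PySem.Set String :=
  PySem.Set.ofList ["Sc", "Y", "Ti", "Zr", "Hf", "V", "Nb", "Ta", "Cr", "Mo", "W"]

def is_bare_mxene_py (comps : List (String × Int)) : Bool :=
  if comps.isEmpty then false
  else
    let allowed : PySem.Set String := PySem.Set.union pvEarlyTM (PySem.Set.ofList ["C", "N"])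
    if (comps.map Prod.fst).any (fun el => !(PySem.Set.contains allowed el)) then false
    else
      let has_tm := (comps.map Prod.fst).any (fun el => PySem.Set.contains pvEarlyTM el)
      let has_cn := (comps.map Prod.fst).any (fun el => el == "C" || el == "N")
      has_tm && has_cn

-- ===== PORT B =====
def pvAltLoop : List (String × Int) → Bool → Bool → Bool
  | [], has_tm, has_cn => has_tm && has_cn
  | (el, _) :: rest, has_tm, has_cn =>
    if PySem.Set.contains pvEarlyTM el then pvAltLoop rest true has_cn
    else if el == "C" || el == "N" then pvAltLoop rest has_tm true
    else false

def is_bare_mxene_py_alt (comps : List (String × Int)) : Bool :=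
  pvAltLoop comps false false

-- ===== PRECONDITION & SPEC =====
def Spec_is_bare_mxene_py (comps : List (String × Int)) (out : Bool) : Prop := out = is_bare_mxene_py_alt comps
instance (comps : List (String × Int)) (out : Bool) : Decidable (Spec_is_bare_mxene_py comps out) := by unfold Spec_is_bare_mxene_py; infer_instance

-- ===== CLAIM (what is proved, stated in full; the proofs are below) =====
def Claim_equal_is_bare_mxene_py : Prop := ∀ (comps : List (String × Int)), Dom_is_bare_mxene_py comps → Spec_is_bare_mxene_py comps (is_bare_mxene_py comps)

-- ===== LEMMAS AND PROOFS =====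

-- Characterisation of B's loop: false if some key is neither an early TM nor C/N,
-- otherwise the two accumulated flags OR'd with the corresponding any-scans.
theorem pvAltLoop_char (comps : List (String × Int)) (tm cn : Bool) :
    pvAltLoop comps tm cn =
      if (comps.map Prod.fst).any (fun el =>
            !(PySem.Set.contains pvEarlyTM el) && !(el == "C" || el == "N")) then false
      else (tm || (comps.map Prod.fst).any (fun el => PySem.Set.contains pvEarlyTM el)) &&
           (cn || (comps.map Prod.fst).any (fun el => el == "C" || el == "N")) := by
  induction comps generalizing tm cn with
  | nil => simp [pvAltLoop]
  | cons hd tl ih =>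
    obtain ⟨el, n⟩ := hd
    cases hp : PySem.Set.contains pvEarlyTM el with
    | true =>
      have hq : (el == "C" || el == "N") = false := by
        cases hq : (el == "C" || el == "N") with
        | false => rfl
        | true =>
          have hcn : el = "C" ∨ el = "N" := by simpa using hq
          rcases hcn with rfl | rfl <;> exact absurd hp (by decide)
      have hd : decide (el ∈ pvEarlyTM) = true := by simpa using hp
      simp [pvAltLoop, hd, hq, ih]
    | false =>
      have hd : decide (el ∈ pvEarlyTM) = false := by simpa using hp
      cases hq : (el == "C" || el == "N") with
      | true => simp [pvAltLoop, hd, hq, ih]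
      | false => simp [pvAltLoop, hd, hq]

-- Membership in A's 'allowed' set is membership in _EARLY_TM or being "C"/"N".
theorem pvAllowed_iff (el : String) :
    PySem.Set.contains (PySem.Set.union pvEarlyTM (PySem.Set.ofList ["C", "N"])) el =
      (PySem.Set.contains pvEarlyTM el || (el == "C" || el == "N")) := by
  rw [Bool.eq_iff_iff]
  simp [PySem.Set.mem_union, PySem.Set.mem_ofList]

-- ===== VERDICT (by name: the statement is the Claim_ definition above) =====
theorem is_bare_mxene_py_spec : Claim_equal_is_bare_mxene_py := by
  intro comps _
  unfold Spec_is_bare_mxene_py is_bare_mxene_py is_bare_mxene_py_alt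
  rw [pvAltLoop_char]
  have hf : (fun el => !(PySem.Set.contains pvEarlyTM el) && !(el == "C" || el == "N"))
      = (fun el => !(PySem.Set.contains pvEarlyTM el || (el == "C" || el == "N"))) := by
    funext x
    cases h1 : PySem.Set.contains pvEarlyTM x <;>
      cases h2 : (x == "C" || x == "N") <;> simp
  rw [hf]
  cases comps with
  | nil => simp
  | cons hd tl =>
    have hbeq : ∀ a b : String, (a == b) = decide (a = b) := fun a b => by
      cases h : a == b
      · simp [(by simpa using h : ¬ a = b)]
      · simp [(by simpa using h : a = b)]
    simp [pvAllowed_iff, hbeq]
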